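-- pv_equiv track=rewrite | github.com/data-yeon/DataScienceFundamentals | codingTest/07-자료구조 큐/카드2(1)_Deque사용.py | solution
-- ===== SOURCE A (Python) =====
-- from collections import deque;
--
-- def solution( N: int ) -> int:
--   myQueue = deque()
--
--   for i in range(1, N+1):
--     myQueue.append(i)
--   while len(myQueue) > 1:
--     myQueue.popleft()
--     myQueue.append(myQueue.popleft())
--   return myQueue[0]
-- ===== SOURCE B (Python) =====
-- def solution(N: int) -> int:
--   # Josephus (k=2, discard-first) by halving recurrence: O(log N) instead of A's O(N).
--   if N <= 1:
--     return N
--   if N % 2 == 0: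
--     return 2 * solution(N // 2)
--   return 2 * solution((N + 1) // 2) - 2
-- ===== Notes on version B (the rewrite author's own statement) =====
-- stated objective: faster
-- what changed: Replaces A's linear deque simulation (discard the front card, requeue the next, until one remains) with the logarithmic Josephus halving recurrence: the survivor for an even count is twice the survivor for half the count, and for an odd count twice the survivor for half of one more, minus two.
import Mathlib
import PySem

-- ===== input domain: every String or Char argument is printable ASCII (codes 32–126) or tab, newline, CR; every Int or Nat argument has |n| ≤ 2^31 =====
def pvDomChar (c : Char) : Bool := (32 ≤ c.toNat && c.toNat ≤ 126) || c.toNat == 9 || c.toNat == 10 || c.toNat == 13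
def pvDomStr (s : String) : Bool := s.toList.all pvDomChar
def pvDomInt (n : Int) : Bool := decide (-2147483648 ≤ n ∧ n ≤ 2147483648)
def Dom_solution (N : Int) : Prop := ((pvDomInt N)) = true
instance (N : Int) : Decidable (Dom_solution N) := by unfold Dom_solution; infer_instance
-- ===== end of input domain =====

-- B replaces A's O(N) deque simulation by the O(log N) Josephus halving recurrence (proved equal for N ≥ 1).

-- ===== PORT A =====
-- 'while len(myQueue) > 1: myQueue.popleft(); myQueue.append(myQueue.popleft())'
-- (each iteration shortens the deque by one, so the initial length is enough fuel;
-- proved exact in whileLoop_eq_runQ below)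
def whileLoop {α : Type} : Nat → List α → List α
  | fuel + 1, _ :: b :: rest => whileLoop fuel (rest ++ [b])
  | _, q => q

def solution (N : Int) : Int :=
  -- for i in range(1, N+1): myQueue.append(i); then return myQueue[0]
  -- (pyGet? is none, Python's IndexError, only for N < 1: excluded by Pre_solution)
  let q := (PySem.List.pyRange 1 (N + 1) 1).foldl (fun acc i => acc ++ [i]) []
  (PySem.List.pyGet? (whileLoop q.length q) 0).getD 0

-- ===== PORT B =====
-- Source B's recursion at least halves N each call, so N.toNat is ample fuel
-- (the fuel-0 arm is never reached for the N the recursion visits; altGo_eq_surv proves exactness)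
def altGo : Nat → Int → Int
  | 0, N => N
  | fuel + 1, N =>
    if N ≤ 1 then N
    else if PySem.Int.mod N 2 = 0 then 2 * altGo fuel (PySem.Int.floordiv N 2)
    else 2 * altGo fuel (PySem.Int.floordiv (N + 1) 2) - 2

def solution_alt (N : Int) : Int := altGo N.toNat N

-- ===== PRECONDITION & SPEC =====
-- A raises IndexError (myQueue[0] on an empty deque) for every N < 1.
def Pre_solution (N : Int) : Prop := 1 ≤ N
instance (N : Int) : Decidable (Pre_solution N) := by unfold Pre_solution; infer_instance
def pvWitness_solution : Int := 5

def Spec_solution (N : Int) (out : Int) : Prop := out = solution_alt N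
instance (N : Int) (out : Int) : Decidable (Spec_solution N out) := by unfold Spec_solution; infer_instance

-- ===== CLAIM (what is proved, stated in full; the proofs are below) =====
def Claim_equal_solution : Prop := ∀ (N : Int), Dom_solution N → Pre_solution N → Spec_solution N (solution N)

-- ===== LEMMAS AND PROOFS =====

-- the run of A's while-loop, written as well-founded recursion (proof-side view of whileLoop)
def runQ {α : Type} : List α → List α
  | _ :: b :: rest => runQ (rest ++ [b])
  | q => q
termination_by q => q.length
decreasing_by simp

theorem whileLoop_eq_runQ {α : Type} :
    ∀ (f : Nat) (q : List α), q.length ≤ f + 1 → whileLoop f q = runQ q := by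
  intro f
  induction f with
  | zero =>
      intro q hq
      match q with
      | [] => simp [whileLoop, runQ]
      | [a] => simp [whileLoop, runQ]
  | succ f ih =>
      intro q hq
      match q with
      | [] => simp [whileLoop, runQ]
      | [a] => simp [whileLoop, runQ]
      | a :: b :: rest =>
          show whileLoop f (rest ++ [b]) = runQ (a :: b :: rest)
          rw [ih (rest ++ [b]) (by simp at hq ⊢; omega)]
          conv_rhs => rw [runQ]

-- the elements the first pass of A's loop keeps: every second element
def evens {α : Type} : List α → List α
  | _ :: b :: t => b :: evens t
  | _ => []

theorem runQ_map {α β : Type} (f : α → β) (l : List α) :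
    runQ (l.map f) = (runQ l).map f := by
  fun_induction runQ l with
  | case1 a b rest ih =>
      simpa [runQ] using ih
  | case2 q h =>
      match q, h with
      | [], _ => simp [runQ]
      | [a], _ => simp [runQ]
      | a :: b :: r, h => exact absurd rfl (h a b r)

theorem evens_append {α : Type} :
    ∀ (m : Nat) (l l' : List α), l.length = 2 * m →
      evens (l ++ l') = evens l ++ evens l' := by
  intro m
  induction m with
  | zero => intro l l' h; rw [List.length_eq_zero_iff.mp h]; simp [evens]
  | succ m ih =>
      intro l l' h
      match l with
      | [] => simp at h
      | [a] => simp at h; omega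
      | a :: b :: t =>
          simp only [List.cons_append, evens]
          rw [ih t l' (by simp at h; omega)]

theorem runQ_round {α : Type} :
    ∀ (m : Nat) (l rest : List α), l.length = 2 * m →
      runQ (l ++ rest) = runQ (rest ++ evens l) := by
  intro m
  induction m with
  | zero => intro l rest h; rw [List.length_eq_zero_iff.mp h]; simp [evens]
  | succ m ih =>
      intro l rest h
      match l with
      | [] => simp at h
      | [a] => simp at h; omega
      | a :: b :: t =>
          have hlen : t.length = 2 * m := by simp at h; omega
          calc runQ ((a :: b :: t) ++ rest)
              = runQ ((t ++ rest) ++ [b]) := by simp [runQ]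
            _ = runQ (t ++ (rest ++ [b])) := by rw [List.append_assoc]
            _ = runQ ((rest ++ [b]) ++ evens t) := ih t (rest ++ [b]) hlen
            _ = runQ (rest ++ evens (a :: b :: t)) := by
                  simp [evens, List.append_assoc]

theorem evens_range : ∀ (m : Nat),
    evens (List.range (2 * m)) = (List.range m).map (fun k => 2 * k + 1) := by
  intro m
  induction m with
  | zero => simp [evens]
  | succ m ih =>
      have h1 : List.range (2 * (m + 1)) = List.range (2 * m) ++ [2 * m, 2 * m + 1] := by
        have e1 : List.range (2 * m + 1) = List.range (2 * m) ++ [2 * m] := List.range_succ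
        have e2 : List.range (2 * m + 1 + 1) = List.range (2 * m + 1) ++ [2 * m + 1] :=
          List.range_succ
        rw [(by omega : 2 * (m + 1) = 2 * m + 1 + 1), e2, e1, List.append_assoc]
        rfl
      rw [h1, evens_append m _ _ (by simp), ih, List.range_succ]
      simp [evens]

-- the 0-indexed survivor position; same halving recurrence as B, on Nat
def surv (n : Nat) : Nat :=
  if n ≤ 1 then 0
  else if n % 2 = 0 then 2 * surv (n / 2) + 1 else 2 * surv ((n + 1) / 2) - 1
termination_by n
decreasing_by all_goals omega

theorem surv_one : surv 1 = 0 := by simp [surv]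

theorem surv_even (m : Nat) (hm : 1 ≤ m) : surv (2 * m) = 2 * surv m + 1 := by
  rw [surv]
  have h1 : ¬ (2 * m ≤ 1) := by omega
  have h2 : 2 * m % 2 = 0 := by omega
  have h3 : 2 * m / 2 = m := by omega
  simp [h1, h3]

theorem surv_odd (m : Nat) (hm : 1 ≤ m) :
    surv (2 * m + 1) = 2 * surv (m + 1) - 1 := by
  rw [surv]
  have h1 : ¬ (2 * m + 1 ≤ 1) := by omega
  have h2 : ¬ ((2 * m + 1) % 2 = 0) := by omega
  have h3 : (2 * m + 1 + 1) / 2 = m + 1 := by omega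
  simp [h1, h3]

theorem surv_pos : ∀ (n : Nat), 2 ≤ n → 1 ≤ surv n := by
  intro n
  induction n using Nat.strong_induction_on with
  | _ n ih =>
      intro hn
      rcases Nat.even_or_odd n with ⟨m, hm⟩ | ⟨m, hm⟩
      · have hm1 : 1 ≤ m := by omega
        rw [hm, (by omega : m + m = 2 * m), surv_even m hm1]; omega
      · have hm1 : 1 ≤ m := by omega
        rw [hm, (by omega : 2 * m + 1 = 2 * m + 1), surv_odd m hm1]
        have := ih (m + 1) (by omega) (by omega)
        omega

theorem runQ_range : ∀ (n : Nat), 1 ≤ n →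
    runQ (List.range n) = [surv n] := by
  intro n
  induction n using Nat.strong_induction_on with
  | _ n ih =>
      intro hn
      rcases Nat.lt_or_ge n 2 with h2 | h2
      · have : n = 1 := by omega
        subst this
        simp [List.range_succ, runQ, surv_one]
      · rcases Nat.even_or_odd n with ⟨m, hm⟩ | ⟨m, hm⟩
        · -- n = 2 * m
          have hm1 : 1 ≤ m := by omega
          have hn2 : n = 2 * m := by omega
          subst hn2
          have hr := runQ_round m (List.range (2 * m)) [] (by simp)
          rw [List.append_nil, List.nil_append] at hr
          rw [hr, evens_range, runQ_map, ih m (by omega) hm1,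
              surv_even m hm1]
          simp
        · -- n = 2 * m + 1
          have hm1 : 1 ≤ m := by omega
          subst hm
          have hsplit : List.range (2 * m + 1) = List.range (2 * m) ++ [2 * m] :=
            List.range_succ
          rw [hsplit,
              runQ_round m (List.range (2 * m)) [2 * m] (by simp),
              evens_range]
          have hrw : (2 * m) :: (List.range m).map (fun k => 2 * k + 1)
              = (List.range (m + 1)).map
                  (fun k => if k = 0 then 2 * m else 2 * k - 1) := by
            rw [List.range_succ_eq_map]
            simp only [List.map_cons, List.map_map]
            refine congrArg₂ List.cons (by simp) ?_
            refine List.map_congr_left fun k _ => ?_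
            simp [Function.comp]
            omega
          rw [List.singleton_append, hrw, runQ_map,
              ih (m + 1) (by omega) (by omega)]
          have hs := surv_pos (m + 1) (by omega)
          rw [surv_odd m hm1]
          simp
          omega

theorem solution_eq_surv (n : Nat) (hn : 1 ≤ n) :
    solution (n : Int) = 1 + (surv n : Int) := by
  have hq : ((PySem.List.pyRange 1 ((n : Int) + 1) 1).foldl
        (fun acc i => acc ++ [i]) ([] : List Int))
      = (List.range n).map (fun k : Nat => (1 : Int) + (k : Int)) := by
    rw [PySem.List.foldl_append_singleton_eq_self, List.nil_append,
        PySem.List.pyRange_one]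
    have hcast : ((n : Int) + 1 - 1).toNat = n := by omega
    rw [hcast]
  simp only [solution, hq]
  rw [whileLoop_eq_runQ _ _ (by simp), runQ_map, runQ_range n hn]
  simp [PySem.List.pyGet?, PySem.List.pyIdx?]

theorem altGo_eq_surv : ∀ (f n : Nat), 1 ≤ n → n ≤ f →
    altGo f (n : Int) = 1 + (surv n : Int) := by
  intro f
  induction f using Nat.strong_induction_on with
  | _ f ih =>
      intro n hn hf
      match f with
      | 0 => omega
      | f + 1 =>
        simp only [altGo]
        rcases Nat.lt_or_ge n 2 with h2 | h2
        · have : n = 1 := by omega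
          subst this
          simp [surv_one]
        · have hle : ¬ ((n : Int) ≤ 1) := by exact_mod_cast by omega
          have hmod : PySem.Int.mod (n : Int) 2 = (n : Int) % 2 :=
            PySem.Int.mod_eq_emod_of_pos (by omega)
          have hdiv : PySem.Int.floordiv (n : Int) 2 = (n : Int) / 2 :=
            PySem.Int.floordiv_eq_ediv_of_pos (by omega)
          have hdiv1 : PySem.Int.floordiv ((n : Int) + 1) 2 = ((n : Int) + 1) / 2 :=
            PySem.Int.floordiv_eq_ediv_of_pos (by omega)
          rcases Nat.even_or_odd n with ⟨m, hm⟩ | ⟨m, hm⟩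
          · have hm1 : 1 ≤ m := by omega
            have hn2 : n = 2 * m := by omega
            subst hn2
            have hz : (((2 * m : Nat) : Int)) % 2 = 0 := by push_cast; omega
            have hd : (((2 * m : Nat) : Int)) / 2 = ((m : Nat) : Int) := by push_cast; omega
            rw [if_neg hle, hmod, hz, if_pos rfl, hdiv, hd,
                ih f (by omega) m hm1 (by omega), surv_even m hm1]
            push_cast; ring
          · have hm1 : 1 ≤ m := by omega
            subst hm
            have hz : (((2 * m + 1 : Nat) : Int)) % 2 = 1 := by push_cast; omega
            have hd : (((2 * m + 1 : Nat) : Int) + 1) / 2 = ((m + 1 : Nat) : Int) := by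
              push_cast; omega
            rw [if_neg hle, hmod, hz]
            rw [if_neg (by norm_num), hdiv1, hd,
                ih f (by omega) (m + 1) (by omega) (by omega), surv_odd m hm1]
            have hs := surv_pos (m + 1) (by omega)
            push_cast [Nat.cast_sub (by omega : 1 ≤ 2 * surv (m + 1))]
            ring

theorem alt_eq_surv (n : Nat) (hn : 1 ≤ n) :
    solution_alt (n : Int) = 1 + (surv n : Int) := by
  unfold solution_alt
  rw [Int.toNat_natCast]
  exact altGo_eq_surv n n hn le_rfl

-- ===== VERDICT (by name: the statement is the Claim_ definition above) =====
theorem solution_spec : Claim_equal_solution := by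
  intro N _ hpre
  unfold Spec_solution
  have hpre' : (1 : Int) ≤ N := hpre
  have hN : N = ((N.toNat : Nat) : Int) := by omega
  have hn : 1 ≤ N.toNat := by omega
  rw [hN, solution_eq_surv N.toNat hn, alt_eq_surv N.toNat hn]
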